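-- pv_equiv track=rewrite | github.com/dfirs1car1o/saas-assurance | harness/tools.py | _parse_workday_expert_notes
-- ===== SOURCE A (Python) =====
-- def _parse_workday_expert_notes(analysis: str) -> dict[str, str]:
--     """Parse workday-expert analysis text into a per-control-id notes dict.
--
--     Expected format: "Control: <WD-ID>\\nGap: ...\\nFix: ...\\nAPI: ..."
--     """
--     per_finding_notes: dict[str, str] = {}
--     current_cid: str | None = None
--     current_lines: list[str] = []
--     for line in analysis.splitlines():
--         if line.startswith("Control:"):
--             if current_cid and current_lines:
--                 per_finding_notes[current_cid] = "\n".join(current_lines).strip()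
--             current_cid = line.split(":", 1)[1].strip()
--             current_lines = [line]
--         elif current_cid:
--             current_lines.append(line)
--     if current_cid and current_lines:
--         per_finding_notes[current_cid] = "\n".join(current_lines).strip()
--     return per_finding_notes
-- ===== SOURCE B (Python) =====
-- def _parse_workday_expert_notes(analysis: str) -> dict[str, str]:
--     """Block-at-a-time parse: skip to the first header, then repeatedly carve out
--     one 'Control:' block (header plus following non-header lines) and store it."""
--     lines = analysis.splitlines()
--     n = len(lines)
--     result: dict[str, str] = {}
--     i = 0
--     while i < n and not lines[i].startswith("Control:"):
--         i += 1
--     while i < n: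
--         j = i + 1
--         while j < n and not lines[j].startswith("Control:"):
--             j += 1
--         cid = lines[i].split(":", 1)[1].strip()
--         if cid:
--             result[cid] = "\n".join(lines[i:j]).strip()
--         i = j
--     return result
-- ===== Notes on version B (the rewrite author's own statement) =====
-- stated objective: alternative
-- what changed: Replaces A's line-by-line state machine (current_cid/current_lines accumulator with a duplicated flush step) by a block-at-a-time scan: skip to the first control-header line, then repeatedly carve out one whole block (header line through the line before the next header) and store it in a single place.
import Mathlib
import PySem

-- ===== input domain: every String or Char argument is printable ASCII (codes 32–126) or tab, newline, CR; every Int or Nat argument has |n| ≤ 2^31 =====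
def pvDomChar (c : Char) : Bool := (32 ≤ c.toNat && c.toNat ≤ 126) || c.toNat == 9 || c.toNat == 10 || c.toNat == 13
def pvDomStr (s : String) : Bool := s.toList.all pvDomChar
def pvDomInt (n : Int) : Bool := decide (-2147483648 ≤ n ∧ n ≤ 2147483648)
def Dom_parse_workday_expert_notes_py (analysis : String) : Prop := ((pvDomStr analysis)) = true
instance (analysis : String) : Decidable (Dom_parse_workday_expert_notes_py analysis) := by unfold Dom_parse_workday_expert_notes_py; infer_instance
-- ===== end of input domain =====

-- B replaces A's line-by-line state machine by a block-at-a-time scan (skip to first header, carve out whole blocks); same cost, different decomposition; return value only.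


-- ===== PORT A =====
-- line.split(":", 1)[1].strip(); the [1] falls back to "" only where Python's [1] cannot
-- be reached: in both programs the line is known to start with "Control:", so the split
-- always has a second piece (exact on all reachable inputs).
def pvCid (line : String) : String :=
  PySem.Str.strip (((PySem.Str.splitMax? line ":" 1).getD []).getD 1 "")

-- 'if current_cid and current_lines: per_finding_notes[current_cid] = "\n".join(current_lines).strip()'
-- (A repeats this code twice; factored as one helper)
def pvFlush (d : PySem.Dict String String) (cid? : Option String) (acc : List String) :
    PySem.Dict String String :=
  match cid? with
  | some cid => if cid ≠ "" ∧ acc ≠ [] then d.insert cid (PySem.Str.strip (PySem.Str.join "\n" acc)) else d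
  | none => d

-- truthiness of current_cid ('elif current_cid:')
def pvTruthy (cid? : Option String) : Bool :=
  match cid? with
  | some cid => decide (cid ≠ "")
  | none => false

-- the 'for line in analysis.splitlines()' loop with state (dict, current_cid, current_lines)
def pvALoop (lines : List String) (d : PySem.Dict String String) (cid? : Option String)
    (acc : List String) : PySem.Dict String String :=
  match lines with
  | [] => pvFlush d cid? acc
  | l :: ls =>
    if PySem.Str.startswith l "Control:" then
      pvALoop ls (pvFlush d cid? acc) (some (pvCid l)) [l]
    else if pvTruthy cid? then
      pvALoop ls d cid? (acc ++ [l])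
    else
      pvALoop ls d cid? acc

def parse_workday_expert_notes_py (analysis : String) : List (String × String) :=
  (pvALoop (PySem.Str.splitlines analysis) PySem.Dict.empty none []).items

-- ===== PORT B =====
def pvNotHeader (l : String) : Bool := !(PySem.Str.startswith l "Control:")

-- the outer 'while i < n' loop of B: 'lines' is the suffix from the current header i on;
-- the inner 'while j' scan is the takeWhile/dropWhile split of the tail
def pvBGo (lines : List String) (d : PySem.Dict String String) : PySem.Dict String String :=
  match lines with
  | [] => d
  | l :: ls =>
    let block := l :: ls.takeWhile pvNotHeader          -- lines[i:j]
    let cid := pvCid l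
    pvBGo (ls.dropWhile pvNotHeader)
      (if cid ≠ "" then d.insert cid (PySem.Str.strip (PySem.Str.join "\n" block)) else d)
termination_by lines.length
decreasing_by
  simp only [List.length_cons]
  exact Nat.lt_succ_of_le (List.length_dropWhile_le _ _)

def parse_workday_expert_notes_py_alt (analysis : String) : List (String × String) :=
  (pvBGo ((PySem.Str.splitlines analysis).dropWhile pvNotHeader) PySem.Dict.empty).items

-- ===== PRECONDITION & SPEC =====
def Spec_parse_workday_expert_notes_py (analysis : String) (out : List (String × String)) : Prop := out = parse_workday_expert_notes_py_alt analysis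
instance (analysis : String) (out : List (String × String)) : Decidable (Spec_parse_workday_expert_notes_py analysis out) := by unfold Spec_parse_workday_expert_notes_py; infer_instance

-- ===== CLAIM (what is proved, stated in full; the proofs are below) =====
def Claim_equal_parse_workday_expert_notes_py : Prop := ∀ (analysis : String), Dom_parse_workday_expert_notes_py analysis → Spec_parse_workday_expert_notes_py analysis (parse_workday_expert_notes_py analysis)

-- ===== LEMMAS AND PROOFS =====

-- In the middle of a block: A's accumulator run equals "finish the current block, then B".
theorem pvALoop_some_eq (ls : List String) : ∀ (d : PySem.Dict String String) (cid : String)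
    (acc : List String), acc ≠ [] →
    pvALoop ls d (some cid) acc
      = pvBGo (ls.dropWhile pvNotHeader)
          (if cid ≠ "" then
             d.insert cid (PySem.Str.strip (PySem.Str.join "\n" (acc ++ ls.takeWhile pvNotHeader)))
           else d) := by
  induction ls with
  | nil =>
    intro d cid acc hacc
    simp [pvALoop, pvFlush, pvBGo, hacc]
  | cons l ls ih =>
    intro d cid acc hacc
    by_cases hl : PySem.Str.startswith l "Control:" = true
    · have hnh : pvNotHeader l = false := by simp only [pvNotHeader, hl, Bool.not_true]
      rw [pvALoop]
      simp only [hl, if_true]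
      rw [ih _ (pvCid l) [l] (by simp)]
      rw [List.dropWhile_cons, List.takeWhile_cons, hnh]
      simp only [Bool.false_eq_true, if_false]
      rw [pvBGo]
      simp [pvFlush, hacc]
    · rw [Bool.not_eq_true] at hl
      have hnh : pvNotHeader l = true := by simp only [pvNotHeader, hl, Bool.not_false]
      rw [pvALoop]
      simp only [hl, Bool.false_eq_true, if_false]
      rw [List.dropWhile_cons, List.takeWhile_cons, hnh]
      simp only [if_true]
      by_cases hcid : cid = ""
      · subst hcid
        simp only [pvTruthy, ne_eq, not_true_eq_false, decide_false, Bool.false_eq_true, if_false]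
        rw [ih _ "" acc hacc]
        simp
      · simp only [pvTruthy, ne_eq, hcid, not_false_eq_true, decide_true, if_true]
        rw [ih _ cid (acc ++ [l]) (by simp)]
        simp [hcid, List.append_assoc]

-- Before the first header: A just skips lines, i.e. it is B on the dropWhile'd suffix.
theorem pvALoop_none_eq (ls : List String) : ∀ (d : PySem.Dict String String),
    pvALoop ls d none [] = pvBGo (ls.dropWhile pvNotHeader) d := by
  induction ls with
  | nil => intro d; simp [pvALoop, pvFlush, pvBGo]
  | cons l ls ih =>
    intro d
    by_cases hl : PySem.Str.startswith l "Control:" = true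
    · have hnh : pvNotHeader l = false := by simp only [pvNotHeader, hl, Bool.not_true]
      rw [pvALoop]
      simp only [hl, if_true]
      rw [pvALoop_some_eq ls (pvFlush d none []) (pvCid l) [l] (by simp)]
      rw [List.dropWhile_cons, hnh]
      simp only [Bool.false_eq_true, if_false]
      rw [pvBGo]
      simp [pvFlush]
    · rw [Bool.not_eq_true] at hl
      have hnh : pvNotHeader l = true := by simp only [pvNotHeader, hl, Bool.not_false]
      rw [pvALoop]
      simp only [hl, Bool.false_eq_true, if_false, pvTruthy]
      rw [List.dropWhile_cons, hnh]
      simp only [if_true]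
      exact ih d

-- ===== VERDICT (by name: the statement is the Claim_ definition above) =====
theorem parse_workday_expert_notes_py_spec : Claim_equal_parse_workday_expert_notes_py := by
  intro analysis _
  unfold Spec_parse_workday_expert_notes_py parse_workday_expert_notes_py parse_workday_expert_notes_py_alt
  rw [pvALoop_none_eq]
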